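-- pv_equiv track=rewrite | github.com/carlosjhoan/Campuslands | sweetCo_matrices.py | ventas_dia
-- ===== SOURCE A (Python) =====
-- def ventas_dia(mat, mt_prc):
--     ventas_dias = []
--     vta_dia = []
--
--     for c in range(len(mat[0])):
--         for f in range(len(mat)):
--             vta_dia.append(mat[f][c] * mt_prc[f])
--         ventas_dias.append(sum(vta_dia))
--         vta_dia = []
--     print (ventas_dia)
--     return ventas_dias
-- ===== SOURCE B (Python) =====
-- def ventas_dia(mat, mt_prc):
--     ncols = len(mat[0])
--     result = [0] * ncols
--     for f in range(len(mat)):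
--         row = mat[f]
--         p = mt_prc[f]
--         result = [result[c] + row[c] * p for c in range(ncols)]
--     print(ventas_dia)
--     return result
-- ===== Notes on version B (the rewrite author's own statement) =====
-- stated objective: alternative
-- what changed: Row-major single accumulator vector (result[c] += row[c]*price per row) instead of A's column-major per-column list that is built and summed.
-- outside the precondition, e.g. on ventas_dia([[], []], [-1]): A returns [], B raises IndexError
import Mathlib
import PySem

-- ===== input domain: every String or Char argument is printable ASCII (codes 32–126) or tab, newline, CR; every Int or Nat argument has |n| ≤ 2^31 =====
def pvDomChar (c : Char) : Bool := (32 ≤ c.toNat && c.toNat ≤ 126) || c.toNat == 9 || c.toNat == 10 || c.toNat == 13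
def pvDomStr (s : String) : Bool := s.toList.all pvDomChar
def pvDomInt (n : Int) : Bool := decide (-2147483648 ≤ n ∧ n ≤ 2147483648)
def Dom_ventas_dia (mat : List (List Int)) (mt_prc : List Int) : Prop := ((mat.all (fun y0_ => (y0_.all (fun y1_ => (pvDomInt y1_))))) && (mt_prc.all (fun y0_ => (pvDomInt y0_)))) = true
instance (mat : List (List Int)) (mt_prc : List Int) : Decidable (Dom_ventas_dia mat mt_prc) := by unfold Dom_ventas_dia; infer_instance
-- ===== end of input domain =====

-- B replaces A's column-major build-a-list-then-sum with a row-major running accumulator vector ('alternative', same cost).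
-- The stray 'print' in both Pythons is a side effect only; the equivalence is about the return value.

-- ===== PORT A =====
-- column-major: for each column c, build the list of mat[f][c]*mt_prc[f] over rows f, then sum it.
-- getD is exact here: under Pre_ventas_dia every index is in range.
def ventas_dia (mat : List (List Int)) (mt_prc : List Int) : List Int :=
  (List.range (mat.headD []).length).foldl
    (fun ventas_dias c =>
      let vta_dia := (List.range mat.length).foldl
        (fun vta_dia f => vta_dia ++ [(mat.getD f []).getD c 0 * mt_prc.getD f 0]) []
      ventas_dias ++ [vta_dia.foldl (· + ·) 0]) []

-- ===== PORT B =====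
-- row-major: start from [0]*ncols and add each row's contribution into the accumulator vector.
def ventas_dia_alt (mat : List (List Int)) (mt_prc : List Int) : List Int :=
  let ncols := (mat.headD []).length
  (List.range mat.length).foldl
    (fun result f =>
      (List.range ncols).map
        (fun c => result.getD c 0 + (mat.getD f []).getD c 0 * mt_prc.getD f 0))
    (List.replicate ncols 0)

-- ===== PRECONDITION & SPEC =====
-- Pre_ excludes the inputs where Python A raises IndexError (empty mat, a row shorter than
-- the first row, or mt_prc shorter than mat with at least one column), and additionally the
-- degenerate zero-column matrices with mt_prc shorter than mat, where A returns [] without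
-- ever consulting the price vector while B's row loop naturally raises IndexError.
def Pre_ventas_dia (mat : List (List Int)) (mt_prc : List Int) : Prop :=
  mat ≠ [] ∧ mat.length ≤ mt_prc.length ∧ ∀ row ∈ mat, (mat.headD []).length ≤ row.length
instance (mat : List (List Int)) (mt_prc : List Int) : Decidable (Pre_ventas_dia mat mt_prc) := by
  unfold Pre_ventas_dia; infer_instance
def pvWitness_ventas_dia : List (List Int) × List Int := ([[1, 2], [3, 4]], [5, 6])

def Spec_ventas_dia (mat : List (List Int)) (mt_prc : List Int) (out : List Int) : Prop := out = ventas_dia_alt mat mt_prc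
instance (mat : List (List Int)) (mt_prc : List Int) (out : List Int) : Decidable (Spec_ventas_dia mat mt_prc out) := by unfold Spec_ventas_dia; infer_instance

-- ===== CLAIM (what is proved, stated in full; the proofs are below) =====
def Claim_equal_ventas_dia : Prop := ∀ (mat : List (List Int)) (mt_prc : List Int), Dom_ventas_dia mat mt_prc → Pre_ventas_dia mat mt_prc → Spec_ventas_dia mat mt_prc (ventas_dia mat mt_prc)

-- ===== LEMMAS AND PROOFS =====

-- folding append-of-singleton is map
theorem pv_foldl_app_map {α β : Type} (l : List α) (g : α → β) (init : List β) :
    l.foldl (fun acc x => acc ++ [g x]) init = init ++ l.map g := by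
  induction l generalizing init with
  | nil => simp
  | cons x xs ih => simp [List.foldl, ih, List.append_assoc]

theorem pv_getD_map_range {β : Type} [Inhabited β] (n c : ℕ) (h : c < n) (f : ℕ → β) (d : β) :
    ((List.range n).map f).getD c d = f c := by
  rw [List.getD_eq_getElem?_getD]
  simp [h]

-- the column sum over the first k rows, in A's shape
def pvScol (mat : List (List Int)) (mt_prc : List Int) (k c : ℕ) : Int :=
  ((List.range k).foldl (fun vta f => vta ++ [(mat.getD f []).getD c 0 * mt_prc.getD f 0]) []).foldl (· + ·) 0

theorem pvScol_succ (mat : List (List Int)) (mt_prc : List Int) (k c : ℕ) :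
    pvScol mat mt_prc (k + 1) c = pvScol mat mt_prc k c + (mat.getD k []).getD c 0 * mt_prc.getD k 0 := by
  simp [pvScol, List.range_succ, List.foldl_append]

-- B's outer fold maintains the accumulator vector of column sums
theorem pv_alt_invariant (mat : List (List Int)) (mt_prc : List Int) (k : ℕ) :
    (List.range k).foldl
      (fun result f =>
        (List.range (mat.headD []).length).map
          (fun c => result.getD c 0 + (mat.getD f []).getD c 0 * mt_prc.getD f 0))
      (List.replicate (mat.headD []).length 0)
    = (List.range (mat.headD []).length).map (fun c => pvScol mat mt_prc k c) := by
  induction k with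
  | zero =>
      simp [pvScol]
  | succ k ih =>
      rw [List.range_succ, List.foldl_append, ih]
      simp only [List.foldl_cons, List.foldl_nil]
      apply List.map_congr_left
      intro c hc
      rw [pv_getD_map_range _ _ (List.mem_range.mp hc), pvScol_succ]

-- ===== VERDICT (by name: the statement is the Claim_ definition above) =====
theorem ventas_dia_spec : Claim_equal_ventas_dia := by
  intro mat mt_prc _ _
  unfold Spec_ventas_dia ventas_dia ventas_dia_alt
  rw [pv_alt_invariant]
  rw [pv_foldl_app_map (List.range (mat.headD []).length)
        (fun c => ((List.range mat.length).foldl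
          (fun vta f => vta ++ [(mat.getD f []).getD c 0 * mt_prc.getD f 0]) []).foldl (· + ·) 0) []]
  rfl
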